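-- pv_equiv track=rewrite | github.com/RunjeethNikam/Leetcode | dsa-final-exam.py | Missingsmallest
-- ===== SOURCE A (Python) =====
-- def Missingsmallest(A, low, high):
--     if low > high:
--         return low
--     mid = (high + low) // 2
--     if A[mid] > mid:
--         return Missingsmallest(A, low, mid - 1)
--     else:
--         return Missingsmallest(A, mid + 1, high)
-- ===== SOURCE B (Python) =====
-- def _ms_step(A, state):
--     lo, hi = state
--     if lo > hi:
--         return None
--     mid = (lo + hi) // 2
--     if A[mid] > mid:
--         return (lo, mid - 1)
--     return (mid + 1, hi)
--
-- def Missingsmallest(A, low, high):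
--     state = (low, high)
--     while True:
--         nxt = _ms_step(A, state)
--         if nxt is None:
--             return state[0]
--         state = nxt
-- ===== Notes on version B (the rewrite author's own statement) =====
-- stated objective: alternative
-- what changed: Replaces the tail recursion by a pure step function returning the Optional next (low, high) state plus a driver loop that iterates it until exhaustion and returns the final low.
-- outside the precondition, e.g. on Missingsmallest([0], -5, 0): A raises IndexError, B raises IndexError; on Missingsmallest([-10, -10], -4, 1): A returns 2, B returns 2
import Mathlib
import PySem

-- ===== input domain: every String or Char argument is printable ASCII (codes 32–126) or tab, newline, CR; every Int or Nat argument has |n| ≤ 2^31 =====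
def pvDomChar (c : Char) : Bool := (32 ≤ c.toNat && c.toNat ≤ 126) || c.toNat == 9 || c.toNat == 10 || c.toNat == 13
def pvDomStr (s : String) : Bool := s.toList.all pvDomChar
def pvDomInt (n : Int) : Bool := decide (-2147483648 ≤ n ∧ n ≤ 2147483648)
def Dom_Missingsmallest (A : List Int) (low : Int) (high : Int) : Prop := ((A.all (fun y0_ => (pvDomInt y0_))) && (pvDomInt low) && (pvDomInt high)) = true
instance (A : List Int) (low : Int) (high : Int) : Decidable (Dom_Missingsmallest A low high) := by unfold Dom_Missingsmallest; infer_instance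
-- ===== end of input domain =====

-- B decomposes A's tail-recursive binary search into a pure step function (Optional next state) plus a driver loop; return-value equivalence on Pre_.


-- ===== PORT A =====
-- Literal port of A's tail recursion; `none` from pyGet? is Python's IndexError, excluded by Pre_.
def Missingsmallest (A : List Int) (low : Int) (high : Int) : Int :=
  if low > high then low
  else
    let mid := PySem.Int.floordiv (high + low) 2
    match PySem.List.pyGet? A mid with
    | some v =>
        if v > mid then Missingsmallest A low (mid - 1)
        else Missingsmallest A (mid + 1) high
    | none => low   -- IndexError in Python (unreachable under Pre_; placeholder value)
termination_by (high - low + 1).toNat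
decreasing_by
  · have h := PySem.Int.floordiv_two_mid_bounds (lo := low) (hi := high) (by omega)
    rw [add_comm] at h; omega
  · have h := PySem.Int.floordiv_two_mid_bounds (lo := low) (hi := high) (by omega)
    rw [add_comm] at h; omega

-- ===== PORT B =====
-- Port of _ms_step: Python's None becomes Option.none; an IndexError (pyGet? = none,
-- excluded by Pre_) is also rendered as none, making the driver stop.
def msStep (A : List Int) (s : Int × Int) : Option (Int × Int) :=
  let lo := s.1
  let hi := s.2
  if lo > hi then none
  else
    let mid := PySem.Int.floordiv (lo + hi) 2
    match PySem.List.pyGet? A mid with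
    | some v => if v > mid then some (lo, mid - 1) else some (mid + 1, hi)
    | none => none   -- IndexError in Python; Pre_ excludes this

-- The `while True` driver, ported with fuel (each step shrinks the range, so
-- (high - low + 1).toNat iterations always suffice; on exhaustion both cases return state.1).
def msRun (A : List Int) : Nat → Int × Int → Int
  | 0, s => s.1
  | Nat.succ fuel, s =>
      match msStep A s with
      | none => s.1
      | some s' => msRun A fuel s'

def Missingsmallest_alt (A : List Int) (low : Int) (high : Int) : Int :=
  msRun A (high - low + 1).toNat (low, high)

-- ===== PRECONDITION & SPEC =====
-- Pre_ excludes ranges that can reach an index outside [-len(A), len(A)), where A raises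
-- IndexError; on the rare such ranges where negative-index wraparound still lets A return,
-- B returns the same value anyway.
def Pre_Missingsmallest (A : List Int) (low : Int) (high : Int) : Prop :=
  low > high ∨ (-(A.length : Int) ≤ low ∧ high < (A.length : Int))
instance (A : List Int) (low : Int) (high : Int) : Decidable (Pre_Missingsmallest A low high) := by unfold Pre_Missingsmallest; infer_instance

def pvWitness_Missingsmallest : List Int × Int × Int := ([0, 1, 3, 4], 0, 3)

def Spec_Missingsmallest (A : List Int) (low : Int) (high : Int) (out : Int) : Prop := out = Missingsmallest_alt A low high
instance (A : List Int) (low : Int) (high : Int) (out : Int) : Decidable (Spec_Missingsmallest A low high out) := by unfold Spec_Missingsmallest; infer_instance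

-- ===== CLAIM (what is proved, stated in full; the proofs are below) =====
def Claim_equal_Missingsmallest : Prop := ∀ (A : List Int) (low : Int) (high : Int), Dom_Missingsmallest A low high → Pre_Missingsmallest A low high → Spec_Missingsmallest A low high (Missingsmallest A low high)

-- ===== LEMMAS AND PROOFS =====
-- With any fuel at least the width of the range, the fueled driver computes exactly
-- A's recursion (same narrowing decisions), so the two ports agree on ALL inputs.
theorem msRun_eq (A : List Int) (low high : Int) :
    ∀ fuel : Nat, (high - low + 1).toNat ≤ fuel →
      msRun A fuel (low, high) = Missingsmallest A low high := by
  fun_induction Missingsmallest A low high with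
  | case1 low high h =>
      intro fuel _
      cases fuel with
      | zero => rfl
      | succ f => simp [msRun, msStep, h]
  | case2 low high h mid v hget hgt ih =>
      intro fuel hfuel
      have hb : low ≤ mid ∧ mid ≤ high := by
        have := PySem.Int.floordiv_two_mid_bounds (lo := low) (hi := high) (by omega)
        rw [add_comm] at this; exact this
      cases fuel with
      | zero => omega
      | succ f =>
          simp only [msRun, msStep, if_neg h]
          rw [show PySem.Int.floordiv (low + high) 2 = mid from by rw [add_comm]]
          simp only [hget, if_pos hgt]
          exact ih f (by omega)
  | case3 low high h mid v hget hgt ih =>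
      intro fuel hfuel
      have hb : low ≤ mid ∧ mid ≤ high := by
        have := PySem.Int.floordiv_two_mid_bounds (lo := low) (hi := high) (by omega)
        rw [add_comm] at this; exact this
      cases fuel with
      | zero => omega
      | succ f =>
          simp only [msRun, msStep, if_neg h]
          rw [show PySem.Int.floordiv (low + high) 2 = mid from by rw [add_comm]]
          simp only [hget, if_neg hgt]
          exact ih f (by omega)
  | case4 low high h mid hnone =>
      intro fuel _
      cases fuel with
      | zero => rfl
      | succ f =>
          simp only [msRun, msStep, if_neg h]
          rw [show PySem.Int.floordiv (low + high) 2 = mid from by rw [add_comm]]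
          simp only [hnone]

-- ===== VERDICT (by name: the statement is the Claim_ definition above) =====
theorem Missingsmallest_spec : Claim_equal_Missingsmallest := by
  intro A low high _ _
  unfold Spec_Missingsmallest Missingsmallest_alt
  exact (msRun_eq A low high _ le_rfl).symm
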